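-- pv_equiv track=rewrite | github.com/qja1998/SSAFY_algorithm_study | SWEA/모의_역량_테스트/2382_미생물_격리/shin.py | new_microbe_info
-- ===== SOURCE A (Python) =====
-- def new_microbe_info(mic_info):
--     sum_mic = {}
--     max_dir = {}
--
--     for item in mic_info:
--         coord = (item[0], item[1])
--         if item[2] == 0:
--             continue
--         else:
--             value = item[2]
--         direction = item[3]
--
--         if coord in sum_mic:
--             sum_mic[coord] += value
--         else:
--             sum_mic[coord] = value
--
--         if coord not in max_dir or value > max_dir[coord][0]:
--             max_dir[coord] = (value, direction)
--
--     result = []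
--     for coord in sum_mic:
--         total_sum = sum_mic[coord]
--         pre_dir = max_dir[coord][1]
--         result.append([coord[0], coord[1], total_sum, pre_dir])
--
--     return result
-- ===== SOURCE B (Python) =====
-- def new_microbe_info(mic_info):
--     # group-then-reduce: one grouping pass, then aggregate each group
--     groups = {}
--     for item in mic_info:
--         if item[2] == 0:
--             continue
--         groups.setdefault((item[0], item[1]), []).append((item[2], item[3]))
--
--     result = []
--     for coord, entries in groups.items():
--         total_sum = sum(v for v, _ in entries)
--         direction = max(entries, key=lambda t: t[0])[1]
--         result.append([coord[0], coord[1], total_sum, direction])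
--     return result
-- ===== Notes on version B (the rewrite author's own statement) =====
-- stated objective: alternative
-- what changed: B replaces A's two running-aggregate dicts (running sum and running strict-max per coordinate) by a single grouping pass building coord -> list of (value, direction), then a reduce step computing sum() and max(key=first) per group.
import Mathlib
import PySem

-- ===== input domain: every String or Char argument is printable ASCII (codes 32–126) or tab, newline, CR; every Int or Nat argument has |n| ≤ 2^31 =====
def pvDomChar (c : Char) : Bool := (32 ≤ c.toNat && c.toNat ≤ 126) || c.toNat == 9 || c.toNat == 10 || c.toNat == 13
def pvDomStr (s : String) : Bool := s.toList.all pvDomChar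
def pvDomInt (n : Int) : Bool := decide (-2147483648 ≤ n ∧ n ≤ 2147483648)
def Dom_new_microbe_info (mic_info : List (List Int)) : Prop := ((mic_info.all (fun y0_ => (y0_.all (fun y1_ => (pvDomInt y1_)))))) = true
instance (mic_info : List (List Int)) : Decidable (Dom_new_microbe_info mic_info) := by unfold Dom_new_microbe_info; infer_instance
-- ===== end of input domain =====

-- B swaps A's two running-aggregate dicts for one grouping dict (coord -> list of (value, direction))
-- followed by a per-group reduce (sum, first-maximal direction); same cost, different decomposition.

-- ===== PORT A =====
-- item[k] is ported as item.getD k 0: inside Pre_ every accessed index is in range, so this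
-- agrees with Python's item[k] (out-of-range, where Python raises IndexError, is excluded by Pre_).
def stepA (st : PySem.Dict (Int × Int) Int × PySem.Dict (Int × Int) (Int × Int))
    (item : List Int) : PySem.Dict (Int × Int) Int × PySem.Dict (Int × Int) (Int × Int) :=
  let coord : Int × Int := (item.getD 0 0, item.getD 1 0)
  if item.getD 2 0 = 0 then st
  else
    let value := item.getD 2 0
    let direction := item.getD 3 0
    let sum_mic :=
      if st.1.contains coord then st.1.insert coord (st.1.getD coord 0 + value)
      else st.1.insert coord value
    let max_dir :=
      if !(st.2.contains coord) || decide ((st.2.getD coord (0, 0)).1 < value) then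
        st.2.insert coord (value, direction)
      else st.2
    (sum_mic, max_dir)

def newA_loop (mic_info : List (List Int)) :
    PySem.Dict (Int × Int) Int × PySem.Dict (Int × Int) (Int × Int) :=
  mic_info.foldl stepA (PySem.Dict.empty, PySem.Dict.empty)

def new_microbe_info (mic_info : List (List Int)) : List (List Int) :=
  (newA_loop mic_info).1.keys.foldl
    (fun result coord =>
      result ++ [[coord.1, coord.2, (newA_loop mic_info).1.getD coord 0,
        ((newA_loop mic_info).2.getD coord (0, 0)).2]])
    []

-- ===== PORT B =====
-- same indexing convention as port A (getD k 0 = item[k] inside Pre_); Python's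
-- groups.setdefault(coord, []).append(e) is Dict.modify coord [] (· ++ [e]);
-- max(entries, key=...) is PySem.List.max? (a group is nonempty, so the .getD default is never used).
def stepB (g : PySem.Dict (Int × Int) (List (Int × Int))) (item : List Int) :
    PySem.Dict (Int × Int) (List (Int × Int)) :=
  if item.getD 2 0 = 0 then g
  else g.modify (item.getD 0 0, item.getD 1 0) [] (· ++ [(item.getD 2 0, item.getD 3 0)])

def newB_groups (mic_info : List (List Int)) : PySem.Dict (Int × Int) (List (Int × Int)) :=
  mic_info.foldl stepB PySem.Dict.empty

def new_microbe_info_alt (mic_info : List (List Int)) : List (List Int) :=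
  (newB_groups mic_info).items.map
    (fun ce =>
      let total_sum := (ce.2.map Prod.fst).sum
      let direction := ((PySem.List.max? ce.2 Prod.fst).getD (0, 0)).2
      [ce.1.1, ce.1.2, total_sum, direction])

-- ===== PRECONDITION & SPEC =====
-- Pre_ excludes exactly the inputs where Python A raises IndexError: an item shorter than 3,
-- or shorter than 4 when its third entry (the microbe count) is nonzero.
def Pre_new_microbe_info (mic_info : List (List Int)) : Prop :=
  ∀ item ∈ mic_info, 3 ≤ item.length ∧ (item.getD 2 0 ≠ 0 → 4 ≤ item.length)
instance (mic_info : List (List Int)) : Decidable (Pre_new_microbe_info mic_info) := by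
  unfold Pre_new_microbe_info; infer_instance

def pvWitness_new_microbe_info : List (List Int) :=
  [[0, 0, 3, 1], [1, 2, 5, 4], [0, 0, 4, 2], [7, 7, 0]]

def Spec_new_microbe_info (mic_info : List (List Int)) (out : List (List Int)) : Prop := out = new_microbe_info_alt mic_info
instance (mic_info : List (List Int)) (out : List (List Int)) : Decidable (Spec_new_microbe_info mic_info out) := by unfold Spec_new_microbe_info; infer_instance

-- ===== CLAIM (what is proved, stated in full; the proofs are below) =====
def Claim_equal_new_microbe_info : Prop := ∀ (mic_info : List (List Int)), Dom_new_microbe_info mic_info → Pre_new_microbe_info mic_info → Spec_new_microbe_info mic_info (new_microbe_info mic_info)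

-- ===== LEMMAS AND PROOFS =====

-- the invariant tying A's two running dicts to B's grouping dict
def pvInv (s : PySem.Dict (Int × Int) Int) (m : PySem.Dict (Int × Int) (Int × Int))
    (g : PySem.Dict (Int × Int) (List (Int × Int))) : Prop :=
  s.keys = g.keys ∧ m.keys = g.keys ∧
  (∀ c, s.getD c 0 = ((g.getD c []).map Prod.fst).sum) ∧
  (∀ c, c ∈ g.keys → some (m.getD c (0, 0)) = PySem.List.max? (g.getD c []) Prod.fst)

theorem max?_append_none (xs : List (Int × Int)) (y : Int × Int)
    (h : PySem.List.max? xs Prod.fst = none) :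
    PySem.List.max? (xs ++ [y]) Prod.fst = some y := by
  unfold PySem.List.max? at h ⊢
  rw [List.foldl_append, h]
  simp

theorem max?_append_some (xs : List (Int × Int)) (y b : Int × Int)
    (h : PySem.List.max? xs Prod.fst = some b) :
    PySem.List.max? (xs ++ [y]) Prod.fst = if b.1 < y.1 then some y else some b := by
  unfold PySem.List.max? at h ⊢
  rw [List.foldl_append, h]
  simp

theorem pvInv_step (s : PySem.Dict (Int × Int) Int) (m : PySem.Dict (Int × Int) (Int × Int))
    (g : PySem.Dict (Int × Int) (List (Int × Int))) (c : Int × Int) (v d : Int)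
    (hInv : pvInv s m g) :
    pvInv (if s.contains c then s.insert c (s.getD c 0 + v) else s.insert c v)
      (if !(m.contains c) || decide ((m.getD c (0, 0)).1 < v) then m.insert c (v, d) else m)
      (g.modify c [] (· ++ [(v, d)])) := by
  obtain ⟨hk, hmk, hs, hx⟩ := hInv
  have hcontains_s : s.contains c = g.contains c := by
    by_cases h : c ∈ g.keys
    · rw [(PySem.Dict.contains_iff_mem_keys s c).mpr (by rw [hk]; exact h),
        (PySem.Dict.contains_iff_mem_keys g c).mpr h]
    · have h1 : s.contains c = false := by
        rw [← Bool.not_eq_true, PySem.Dict.contains_iff_mem_keys, hk]; exact h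
      have h2 : g.contains c = false := by
        rw [← Bool.not_eq_true, PySem.Dict.contains_iff_mem_keys]; exact h
      rw [h1, h2]
  have hcontains_m : m.contains c = g.contains c := by
    by_cases h : c ∈ g.keys
    · rw [(PySem.Dict.contains_iff_mem_keys m c).mpr (by rw [hmk]; exact h),
        (PySem.Dict.contains_iff_mem_keys g c).mpr h]
    · have h1 : m.contains c = false := by
        rw [← Bool.not_eq_true, PySem.Dict.contains_iff_mem_keys, hmk]; exact h
      have h2 : g.contains c = false := by
        rw [← Bool.not_eq_true, PySem.Dict.contains_iff_mem_keys]; exact h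
      rw [h1, h2]
  rw [PySem.Dict.modify]
  refine ⟨?_, ?_, ?_, ?_⟩
  · -- keys of the sum dict
    by_cases hc : g.contains c = true
    · rw [PySem.Dict.keys_insert_of_contains _ _ hc, if_pos (by rwa [hcontains_s]),
        PySem.Dict.keys_insert_of_contains _ _ (by rwa [hcontains_s])]
      exact hk
    · have hc' : g.contains c = false := by simpa using hc
      rw [PySem.Dict.keys_insert_of_not_contains _ _ hc',
        if_neg (by simp [hcontains_s, hc']),
        PySem.Dict.keys_insert_of_not_contains _ _ (by rwa [hcontains_s]), hk]
  · -- keys of the max dict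
    by_cases hc : g.contains c = true
    · rw [PySem.Dict.keys_insert_of_contains _ _ hc]
      by_cases hb : (!(m.contains c) || decide ((m.getD c (0, 0)).1 < v)) = true
      · rw [if_pos hb, PySem.Dict.keys_insert_of_contains _ _ (by rwa [hcontains_m])]
        exact hmk
      · rw [if_neg hb]; exact hmk
    · have hc' : g.contains c = false := by simpa using hc
      rw [PySem.Dict.keys_insert_of_not_contains _ _ hc',
        if_pos (by rw [hcontains_m, hc']; simp),
        PySem.Dict.keys_insert_of_not_contains _ _ (by rwa [hcontains_m]), hmk]
  · -- running sums
    intro c'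
    by_cases hcc : c' = c
    · subst hcc
      rw [PySem.Dict.getD_insert_self]
      by_cases hsc : s.contains c' = true
      · rw [if_pos hsc, PySem.Dict.getD_insert_self, hs c']
        simp
      · have hsc' : s.contains c' = false := by simpa using hsc
        have hg0 : g.getD c' [] = [] :=
          PySem.Dict.getD_of_not_contains g [] (by rwa [← hcontains_s])
        rw [if_neg (by simp [hsc']), PySem.Dict.getD_insert_self, hg0]
        simp
    · rw [PySem.Dict.getD_insert_of_ne g _ _ hcc]
      by_cases hsc : s.contains c = true
      · rw [if_pos hsc, PySem.Dict.getD_insert_of_ne s _ _ hcc]; exact hs c'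
      · rw [if_neg hsc, PySem.Dict.getD_insert_of_ne s _ _ hcc]; exact hs c'
  · -- running strict maxima
    intro c' hmem
    by_cases hcc : c' = c
    · subst hcc
      rw [PySem.Dict.getD_insert_self]
      by_cases hc : g.contains c' = true
      · have hsome := (hx c' ((PySem.Dict.contains_iff_mem_keys g c').mp hc)).symm
        rw [max?_append_some _ (v, d) _ hsome]
        have hmc : m.contains c' = true := by rwa [hcontains_m]
        by_cases hlt : (m.getD c' (0, 0)).1 < v
        · rw [if_pos (by simp [hlt]), PySem.Dict.getD_insert_self, if_pos hlt]
        · rw [if_neg (by simp [hmc, hlt]), if_neg hlt]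
      · have hc' : g.contains c' = false := by simpa using hc
        have hempty : g.getD c' [] = [] := PySem.Dict.getD_of_not_contains g [] hc'
        rw [hempty, max?_append_none _ _ (by simp [PySem.List.max?]),
          if_pos (by rw [hcontains_m, hc']; simp), PySem.Dict.getD_insert_self]
    · have hmem' : c' ∈ g.keys := by
        rcases (PySem.Dict.mem_keys_insert g c c' _).mp hmem with h | h
        · exact absurd h hcc
        · exact h
      rw [PySem.Dict.getD_insert_of_ne g _ _ hcc]
      by_cases hb : (!(m.contains c) || decide ((m.getD c (0, 0)).1 < v)) = true
      · rw [if_pos hb, PySem.Dict.getD_insert_of_ne m _ _ hcc]; exact hx c' hmem'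
      · rw [if_neg hb]; exact hx c' hmem'

theorem pvInv_stepAB (s : PySem.Dict (Int × Int) Int) (m : PySem.Dict (Int × Int) (Int × Int))
    (g : PySem.Dict (Int × Int) (List (Int × Int))) (item : List Int) (hInv : pvInv s m g) :
    pvInv (stepA (s, m) item).1 (stepA (s, m) item).2 (stepB g item) := by
  by_cases h0 : item.getD 2 0 = 0
  · simp only [stepA, stepB]
    rw [if_pos h0, if_pos h0]
    exact hInv
  · simp only [stepA, stepB]
    rw [if_neg h0, if_neg h0]
    exact pvInv_step s m g (item.getD 0 0, item.getD 1 0) (item.getD 2 0) (item.getD 3 0) hInv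

theorem pvInv_loop (l : List (List Int)) (s : PySem.Dict (Int × Int) Int)
    (m : PySem.Dict (Int × Int) (Int × Int)) (g : PySem.Dict (Int × Int) (List (Int × Int)))
    (hInv : pvInv s m g) :
    pvInv (l.foldl stepA (s, m)).1 (l.foldl stepA (s, m)).2 (l.foldl stepB g) := by
  induction l generalizing s m g with
  | nil => exact hInv
  | cons item t ih =>
    simp only [List.foldl_cons]
    have hstep := pvInv_stepAB s m g item hInv
    have hpair : stepA (s, m) item = ((stepA (s, m) item).1, (stepA (s, m) item).2) := rfl
    rw [hpair]
    exact ih _ _ _ hstep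

theorem pvNodup_groups (l : List (List Int)) (g : PySem.Dict (Int × Int) (List (Int × Int)))
    (h : g.keys.Nodup) : (l.foldl stepB g).keys.Nodup := by
  induction l generalizing g with
  | nil => exact h
  | cons item t ih =>
    simp only [List.foldl_cons, stepB]
    split
    · exact ih g h
    · exact ih _ (by rw [PySem.Dict.modify]; exact PySem.Dict.nodup_keys_insert _ _ _ h)

theorem pvInv_final (mic_info : List (List Int)) :
    pvInv (newA_loop mic_info).1 (newA_loop mic_info).2 (newB_groups mic_info) := by
  have hbase : pvInv PySem.Dict.empty PySem.Dict.empty PySem.Dict.empty := by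
    refine ⟨rfl, rfl, ?_, ?_⟩
    · intro c; simp [PySem.Dict.getD_empty]
    · intro c hc; simp [PySem.Dict.keys_empty] at hc
  exact pvInv_loop mic_info PySem.Dict.empty PySem.Dict.empty PySem.Dict.empty hbase

-- ===== VERDICT (by name: the statement is the Claim_ definition above) =====
theorem new_microbe_info_spec : Claim_equal_new_microbe_info := by
  intro mic_info _hDom _hPre
  show new_microbe_info mic_info = new_microbe_info_alt mic_info
  obtain ⟨hk, hmk, hs, hx⟩ := pvInv_final mic_info
  have hnd : (newB_groups mic_info).keys.Nodup := by
    unfold newB_groups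
    exact pvNodup_groups mic_info PySem.Dict.empty (by simp [PySem.Dict.keys_empty])
  have hresA : new_microbe_info mic_info =
      (newB_groups mic_info).keys.map (fun c =>
        [c.1, c.2, (newA_loop mic_info).1.getD c 0, ((newA_loop mic_info).2.getD c (0, 0)).2]) := by
    unfold new_microbe_info
    rw [hk, PySem.List.foldl_append_singleton_eq_map]
    simp
  rw [hresA]
  unfold new_microbe_info_alt
  rw [PySem.Dict.items_eq_map_keys _ hnd [], List.map_map]
  apply List.map_congr_left
  intro c hc
  have h1 := hs c
  have h2 := hx c hc
  simp only [Function.comp]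
  have hdir : ((PySem.List.max? ((newB_groups mic_info).getD c []) Prod.fst).getD (0, 0)).2 =
      ((newA_loop mic_info).2.getD c (0, 0)).2 := by
    rw [← h2]; rfl
  rw [h1, hdir]
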